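-- pv_equiv track=rewrite | github.com/pypi-data/pypi-mirror-402 | packages/fluid-labels/fluid_labels-3.1.4.tar.gz/fluid_labels-3.1.4/labels/enrichers/debian/complete.py | is_stable_debian_version
-- ===== SOURCE A (Python) =====
-- def is_stable_debian_version(version: str) -> bool:
--     unstable_indicators = (
--         "~rc",
--         "~beta",
--         "~alpha",
--         "~dev",
--         "~exp",  # Pre-release versions
--         "+exp",  # Pre-release versions
--         "+git",
--         "~bpo",
--         "~sid",  # Backports and sid/unstable
--         "+nmu",  # Non-maintainer uploads
--         "+next",
--         "experimental",
--         "testing",  # Explicit unstable/testing markers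
--     )
--
--     return not any(indicator in version.lower() for indicator in unstable_indicators)
-- ===== SOURCE B (Python) =====
-- def is_stable_debian_version(version: str) -> bool:
--     unstable_indicators = (
--         "~rc",
--         "~beta",
--         "~alpha",
--         "~dev",
--         "~exp",
--         "+exp",
--         "+git",
--         "~bpo",
--         "~sid",
--         "+nmu",
--         "+next",
--         "experimental",
--         "testing",
--     )
--     v = version.lower()
--     # single left-to-right scan: at each position, test whether any marker starts there
--     return not any(
--         v.startswith(ind, i) for i in range(len(v)) for ind in unstable_indicators
--     )
-- ===== Notes on version B (the rewrite author's own statement) =====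
-- stated objective: alternative
-- what changed: Replaces the per-indicator substring-containment loop ('indicator in v' for each of 13 indicators) with a single position-major scan of the lowered string that tests at each index whether any indicator starts there.
import Mathlib
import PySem

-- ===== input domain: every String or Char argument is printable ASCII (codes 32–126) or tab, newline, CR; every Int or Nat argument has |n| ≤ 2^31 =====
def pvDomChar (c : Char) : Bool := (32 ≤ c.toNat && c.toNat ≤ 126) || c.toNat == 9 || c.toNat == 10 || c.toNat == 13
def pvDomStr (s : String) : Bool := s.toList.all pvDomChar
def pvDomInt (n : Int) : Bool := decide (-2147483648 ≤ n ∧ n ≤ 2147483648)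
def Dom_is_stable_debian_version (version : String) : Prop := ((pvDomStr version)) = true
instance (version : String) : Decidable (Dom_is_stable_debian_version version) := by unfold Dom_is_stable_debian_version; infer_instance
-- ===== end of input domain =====

-- B replaces the per-indicator substring loop by one left-to-right scan of the string,
-- testing at each position whether any marker starts there (objective: alternative).

-- the indicator tuple, identical in both Pythons
def pvIndicators : List String :=
  ["~rc", "~beta", "~alpha", "~dev", "~exp", "+exp", "+git", "~bpo", "~sid",
   "+nmu", "+next", "experimental", "testing"]

-- ===== PORT A =====
-- not any(indicator in version.lower() for indicator in unstable_indicators)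
def is_stable_debian_version (version : String) : Bool :=
  !(pvIndicators.any (fun ind => PySem.Str.isIn ind (PySem.Str.lower version)))

-- ===== PORT B =====
-- v = version.lower(); not any(v.startswith(ind, i) for i in range(len(v)) for ind in indicators)
def is_stable_debian_version_alt (version : String) : Bool :=
  let v := (PySem.Str.lower version).toList
  !((List.range v.length).any (fun i =>
      pvIndicators.any (fun ind => ind.toList.isPrefixOf (v.drop i))))

-- ===== PRECONDITION & SPEC =====
def Spec_is_stable_debian_version (version : String) (out : Bool) : Prop := out = is_stable_debian_version_alt version
instance (version : String) (out : Bool) : Decidable (Spec_is_stable_debian_version version out) := by unfold Spec_is_stable_debian_version; infer_instance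

-- ===== CLAIM (what is proved, stated in full; the proofs are below) =====
def Claim_equal_is_stable_debian_version : Prop := ∀ (version : String), Dom_is_stable_debian_version version → Spec_is_stable_debian_version version (is_stable_debian_version version)

-- ===== LEMMAS AND PROOFS =====

-- swapping the two 'any' quantifiers (position-major ↔ indicator-major)
lemma pv_any_comm {α β : Type} (l : List α) (m : List β) (f : α → β → Bool) :
    l.any (fun x => m.any (fun y => f x y)) = m.any (fun y => l.any (fun x => f x y)) := by
  apply Bool.eq_iff_iff.mpr
  simp only [List.any_eq_true]
  tauto

-- for a nonempty pattern, scanning all start positions equals substring containment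
lemma pv_any_range_prefix (ind cs : List Char) (h : ind ≠ []) :
    (List.range cs.length).any (fun i => ind.isPrefixOf (cs.drop i)) = PySem.Chars.isIn ind cs := by
  apply Bool.eq_iff_iff.mpr
  rw [← PySem.Chars.exists_prefix_drop_iff_isIn]
  simp only [List.any_eq_true, List.mem_range, List.isPrefixOf_iff_prefix]
  constructor
  · rintro ⟨i, _, hp⟩; exact ⟨i, hp⟩
  · rintro ⟨j, hp⟩
    by_cases hj : j < cs.length
    · exact ⟨j, hj, hp⟩
    · exfalso
      rw [List.drop_eq_nil_of_le (le_of_not_gt hj)] at hp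
      exact h (List.prefix_nil.mp hp)

-- ===== VERDICT (by name: the statement is the Claim_ definition above) =====
theorem is_stable_debian_version_spec : Claim_equal_is_stable_debian_version := by
  intro version _
  unfold Spec_is_stable_debian_version
  simp only [is_stable_debian_version, is_stable_debian_version_alt]
  rw [pv_any_comm]
  congr 1
  apply PySem.List.any_congr_mem
  intro ind hind
  rw [pv_any_range_prefix ind.toList _ (by fin_cases hind <;> decide)]
  simp [PySem.Str.isIn]
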